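-- pv_equiv track=rewrite | github.com/Insignem0191/rstlkm_test | python/uploader.py | cr_frmt_str_f_list
-- ===== SOURCE A (Python) =====
-- def cr_frmt_str_f_list(lst):
--     f_str = ""
--     for i, v in enumerate(lst):
--         if i == len(lst) - 1:
--             f_str = f_str + "%s"
--         else:
--             f_str = f_str + "%s, "
--
--     return f_str
-- ===== SOURCE B (Python) =====
-- def cr_frmt_str_f_list(lst):
--     n = len(lst)
--     if n == 0:
--         return ""
--     return "%s, " * (n - 1) + "%s"
-- ===== Notes on version B (the rewrite author's own statement) =====
-- stated objective: simpler
-- what changed: Replaces the per-element loop with a last-index branch by a closed-form construction from the length: string repetition '%s, ' * (n-1) plus a final '%s'.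
import Mathlib
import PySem

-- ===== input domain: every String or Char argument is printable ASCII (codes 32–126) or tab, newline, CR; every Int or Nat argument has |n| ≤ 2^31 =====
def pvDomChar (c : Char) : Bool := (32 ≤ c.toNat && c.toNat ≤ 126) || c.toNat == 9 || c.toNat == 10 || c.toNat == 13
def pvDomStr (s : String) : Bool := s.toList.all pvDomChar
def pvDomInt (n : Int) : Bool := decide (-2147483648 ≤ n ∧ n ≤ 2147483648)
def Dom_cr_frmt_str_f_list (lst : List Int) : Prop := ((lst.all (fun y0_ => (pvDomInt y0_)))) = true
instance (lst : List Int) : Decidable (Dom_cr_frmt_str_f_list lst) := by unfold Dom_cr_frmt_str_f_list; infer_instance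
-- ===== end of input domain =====

-- B replaces A's per-element loop (branching on the last index) by a closed-form
-- string built from the length: "%s, " repeated (n-1) times plus a final "%s"; objective: simpler.


-- ===== PORT A =====
def cr_frmt_str_f_list (lst : List Int) : String :=
  (PySem.List.enumerate lst 0).foldl
    (fun f_str iv =>
      if iv.1 = (lst.length : Int) - 1 then f_str ++ "%s" else f_str ++ "%s, ")
    ""

-- ===== PORT B =====
-- hand port of Python's  s * n  for a string and n ≥ 0 (exact there)
def strRepeat (s : String) : Nat → String
  | 0 => ""
  | n + 1 => s ++ strRepeat s n

def cr_frmt_str_f_list_alt (lst : List Int) : String :=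
  if lst.length = 0 then "" else strRepeat "%s, " (lst.length - 1) ++ "%s"

-- ===== PRECONDITION & SPEC =====
def Spec_cr_frmt_str_f_list (lst : List Int) (out : String) : Prop := out = cr_frmt_str_f_list_alt lst
instance (lst : List Int) (out : String) : Decidable (Spec_cr_frmt_str_f_list lst out) := by unfold Spec_cr_frmt_str_f_list; infer_instance

-- ===== CLAIM (what is proved, stated in full; the proofs are below) =====
def Claim_equal_cr_frmt_str_f_list : Prop := ∀ (lst : List Int), Dom_cr_frmt_str_f_list lst → Spec_cr_frmt_str_f_list lst (cr_frmt_str_f_list lst)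

-- ===== LEMMAS AND PROOFS =====
lemma fold_enum_eq (l : List Int) : ∀ (s : Int) (acc : String) (n : Int),
    s + l.length = n → l ≠ [] →
    (PySem.List.enumerate l s).foldl
      (fun f_str iv => if iv.1 = n - 1 then f_str ++ "%s" else f_str ++ "%s, ") acc
      = acc ++ strRepeat "%s, " (l.length - 1) ++ "%s" := by
  induction l with
  | nil => intro _ _ _ _ h; exact absurd rfl h
  | cons x xs ih =>
    intro s acc n hn _
    rcases xs with _ | ⟨y, ys⟩
    · have hs : s = n - 1 := by simp at hn; omega
      simp [PySem.List.enumerate_cons, PySem.List.enumerate_nil, hs, strRepeat]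
    · have hne : ¬ (s = n - 1) := by
        simp only [List.length_cons] at hn; push_cast at hn; omega
      have hn' : s + 1 + ((y :: ys).length : Int) = n := by
        simp only [List.length_cons] at hn ⊢; push_cast at hn ⊢; omega
      rw [PySem.List.enumerate_cons, List.foldl_cons]
      simp only [if_neg hne]
      rw [ih (s + 1) (acc ++ "%s, ") n hn' (by simp)]
      simp [strRepeat, String.append_assoc]

-- ===== VERDICT (by name: the statement is the Claim_ definition above) =====
theorem cr_frmt_str_f_list_spec : Claim_equal_cr_frmt_str_f_list := by
  intro lst _
  unfold Spec_cr_frmt_str_f_list cr_frmt_str_f_list cr_frmt_str_f_list_alt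
  rcases lst with _ | ⟨x, xs⟩
  · simp [PySem.List.enumerate_nil]
  · rw [fold_enum_eq (x :: xs) 0 "" ((x :: xs).length : Int) (by ring) (by simp)]
    simp
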